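-- pv_equiv track=rewrite | github.com/kdparker/AdventOfCode2023 | day14-2/rolling.py | grid_for_positions
-- ===== SOURCE A (Python) =====
-- def grid_for_positions(grid, positions):
--     new_grid = []
--     for y, row in enumerate(grid):
--         new_row = ""
--         for x, tile in enumerate(row):
--             new_row += "." if tile != "#" and (x, y) not in positions else ("O" if (x,y) in positions else "#")
--         new_grid.append(new_row)
--     return new_grid
-- ===== SOURCE B (Python) =====
-- def grid_for_positions(grid, positions):
--     base = [['#' if t == '#' else '.' for t in row] for row in grid]
--     for (x, y) in positions:
--         if 0 <= y < len(base) and 0 <= x < len(base[y]):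
--             base[y][x] = 'O'
--     return [''.join(row) for row in base]
-- ===== Notes on version B (the rewrite author's own statement) =====
-- stated objective: alternative
-- what changed: B builds the base grid once ('#' kept, everything else '.') and then writes 'O' only at the in-bounds positions, instead of A's per-tile membership test against the positions set on every cell.
import Mathlib
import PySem

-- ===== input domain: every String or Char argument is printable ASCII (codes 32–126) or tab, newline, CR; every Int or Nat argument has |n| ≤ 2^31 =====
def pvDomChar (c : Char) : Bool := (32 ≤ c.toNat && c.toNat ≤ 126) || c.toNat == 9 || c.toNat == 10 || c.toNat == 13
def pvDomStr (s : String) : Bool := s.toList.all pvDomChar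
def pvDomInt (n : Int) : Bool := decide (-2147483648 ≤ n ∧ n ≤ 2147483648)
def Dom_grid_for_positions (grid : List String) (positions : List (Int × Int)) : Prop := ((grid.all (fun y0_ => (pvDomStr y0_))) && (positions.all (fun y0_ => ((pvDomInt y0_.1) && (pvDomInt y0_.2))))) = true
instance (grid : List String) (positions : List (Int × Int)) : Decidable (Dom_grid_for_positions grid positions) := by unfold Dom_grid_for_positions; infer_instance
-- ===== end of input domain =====

-- B rebuilds the grid from the positions set (base grid once, then one write per position)
-- instead of testing every tile for membership: different decomposition, same result.

-- ===== PORT A =====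
-- Python string concatenation 'new_row += <one-char string>' is ported exactly on List Char
-- (the accumulator holds the characters of new_row; Lean's own String.append is kernel-opaque).
def grid_for_positions (grid : List String) (positions : List (Int × Int)) : List String :=
  (PySem.List.enumerate grid).foldl (fun new_grid yrow =>
    new_grid ++ [String.ofList ((PySem.List.enumerate yrow.2.toList).foldl (fun new_row xt =>
      new_row ++ (if xt.2 ≠ '#' ∧ (xt.1, yrow.1) ∉ positions then ['.']
                  else if (xt.1, yrow.1) ∈ positions then ['O'] else ['#'])) [])]) []

-- ===== PORT B =====
-- base grid: '#' stays, everything else becomes '.'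
def gfpBase (grid : List String) : List (List Char) :=
  grid.map (fun row => row.toList.map (fun t => if t = '#' then '#' else '.'))

-- place one rock, guarded to in-bounds non-negative coordinates (Python's explicit bounds check)
def gfpPlace (b : List (List Char)) (p : Int × Int) : List (List Char) :=
  if 0 ≤ p.2 ∧ p.2.toNat < b.length ∧ 0 ≤ p.1 ∧ p.1.toNat < (b.getD p.2.toNat []).length then
    b.modify p.2.toNat (fun r => r.set p.1.toNat 'O')
  else b

def grid_for_positions_alt (grid : List String) (positions : List (Int × Int)) : List String :=
  (positions.foldl gfpPlace (gfpBase grid)).map String.ofList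

-- ===== PRECONDITION & SPEC =====
def Spec_grid_for_positions (grid : List String) (positions : List (Int × Int)) (out : List String) : Prop := out = grid_for_positions_alt grid positions
instance (grid : List String) (positions : List (Int × Int)) (out : List String) : Decidable (Spec_grid_for_positions grid positions out) := by unfold Spec_grid_for_positions; infer_instance

-- ===== CLAIM (what is proved, stated in full; the proofs are below) =====
def Claim_equal_grid_for_positions : Prop := ∀ (grid : List String) (positions : List (Int × Int)), Dom_grid_for_positions grid positions → Spec_grid_for_positions grid positions (grid_for_positions grid positions)

-- ===== LEMMAS AND PROOFS =====

-- one gfpPlace step keeps the row lengths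
lemma gfpPlace_map_length (b : List (List Char)) (p : Int × Int) :
    (gfpPlace b p).map List.length = b.map List.length := by
  unfold gfpPlace
  split
  · apply List.ext_getElem
    · simp [List.length_modify]
    · intro i h1 h2
      simp only [List.getElem_map, List.getElem_modify]
      split <;> simp
  · rfl

lemma gfpFold_map_length (ps : List (Int × Int)) (b : List (List Char)) :
    (ps.foldl gfpPlace b).map List.length = b.map List.length := by
  induction ps generalizing b with
  | nil => rfl
  | cons p ps ih => simpa [gfpPlace_map_length] using ih (gfpPlace b p)

lemma gfpFold_length (ps : List (Int × Int)) (b : List (List Char)) :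
    (ps.foldl gfpPlace b).length = b.length := by
  have h := congrArg List.length (gfpFold_map_length ps b)
  simpa using h

lemma gfpFold_row_length (ps : List (Int × Int)) (b : List (List Char)) (y : Nat) :
    ((ps.foldl gfpPlace b).getD y []).length = (b.getD y []).length := by
  by_cases hy : y < b.length
  · have hy' : y < (ps.foldl gfpPlace b).length := by rw [gfpFold_length]; exact hy
    rw [List.getD_eq_getElem _ _ hy', List.getD_eq_getElem _ _ hy]
    have h := congrArg (fun l => l[y]?) (gfpFold_map_length ps b)
    simp only [List.getElem?_map] at h
    rw [List.getElem?_eq_getElem hy', List.getElem?_eq_getElem hy] at h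
    simpa using h
  · have hy' : ¬ y < (ps.foldl gfpPlace b).length := by rw [gfpFold_length]; exact hy
    rw [List.getD_eq_default _ _ (by omega), List.getD_eq_default _ _ (by omega)]

-- one gfpPlace step, pointwise
lemma gfpPlace_point (b : List (List Char)) (p : Int × Int) (y x : Nat) (d : Char)
    (hy : y < b.length) (hx : x < (b.getD y []).length) :
    ((gfpPlace b p).getD y []).getD x d =
      if p = ((x : Int), (y : Int)) then 'O' else (b.getD y []).getD x d := by
  have hbg : b.getD y [] = b[y] := List.getD_eq_getElem _ _ hy
  have hx' : x < b[y].length := by rw [← hbg]; exact hx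
  rw [hbg, List.getD_eq_getElem _ _ hx']
  unfold gfpPlace
  split
  · rename_i hg
    obtain ⟨h1, h2, h3, h4⟩ := hg
    have hylen : y < (b.modify p.2.toNat (fun r => r.set p.1.toNat 'O')).length := by
      rw [List.length_modify]; exact hy
    rw [List.getD_eq_getElem _ _ hylen, List.getElem_modify]
    by_cases hyy : p.2.toNat = y
    · rw [if_pos hyy]
      have hxlen : x < (b[y].set p.1.toNat 'O').length := by
        rw [List.length_set]; exact hx'
      rw [List.getD_eq_getElem _ _ hxlen, List.getElem_set]
      have hp2 : p.2 = (y : Int) := by omega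
      by_cases hxx : p.1.toNat = x
      · have hp1 : p.1 = (x : Int) := by omega
        rw [if_pos hxx, if_pos (Prod.ext_iff.mpr ⟨hp1, hp2⟩)]
      · have hne : p ≠ ((x : Int), (y : Int)) := by
          intro h; apply hxx; rw [h]; simp
        rw [if_neg hxx, if_neg hne]
    · rw [if_neg hyy]
      have hne : p ≠ ((x : Int), (y : Int)) := by
        intro h; apply hyy; rw [h]; simp
      rw [if_neg hne, List.getD_eq_getElem _ _ hx']
  · rename_i hg
    have hne : p ≠ ((x : Int), (y : Int)) := by
      intro h; apply hg; subst h
      refine ⟨by positivity, by simpa using hy, by positivity, ?_⟩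
      simpa [hbg] using hx
    rw [if_neg hne, List.getD_eq_getElem _ _ hy, List.getD_eq_getElem _ _ hx']

-- the whole fold, pointwise: a cell is 'O' iff its coordinates are in positions
lemma gfpFold_point (ps : List (Int × Int)) (b : List (List Char)) (y x : Nat) (d : Char)
    (hy : y < b.length) (hx : x < (b.getD y []).length) :
    ((ps.foldl gfpPlace b).getD y []).getD x d =
      if ((x : Int), (y : Int)) ∈ ps then 'O' else (b.getD y []).getD x d := by
  induction ps generalizing b with
  | nil => simp
  | cons p ps ih =>
    have hlen : (gfpPlace b p).length = b.length := by
      have := congrArg List.length (gfpPlace_map_length b p); simpa using this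
    have hrow : ((gfpPlace b p).getD y []).length = (b.getD y []).length := by
      have := gfpFold_row_length [p] b y; simpa [List.foldl] using this
    have step := gfpPlace_point b p y x d hy hx
    have := ih (gfpPlace b p) (by omega) (by omega)
    rw [List.foldl_cons, this, step]
    by_cases hmem : ((x : Int), (y : Int)) ∈ ps
    · simp [hmem]
    · by_cases hp : p = ((x : Int), (y : Int)) <;> simp [hmem, hp, eq_comm]

-- A's fold rewritten as a per-cell map
lemma gridA_eq_map (grid : List String) (positions : List (Int × Int)) :
    grid_for_positions grid positions =
      (PySem.List.enumerate grid).map (fun yrow =>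
        String.ofList ((PySem.List.enumerate yrow.2.toList).map (fun xt =>
          if xt.2 ≠ '#' ∧ (xt.1, yrow.1) ∉ positions then '.'
          else if (xt.1, yrow.1) ∈ positions then 'O' else '#'))) := by
  unfold grid_for_positions
  rw [PySem.List.foldl_append_singleton_eq_map
    (f := fun yrow : Int × String => String.ofList ((PySem.List.enumerate yrow.2.toList).foldl (fun new_row xt =>
      new_row ++ (if xt.2 ≠ '#' ∧ (xt.1, yrow.1) ∉ positions then ['.']
                  else if (xt.1, yrow.1) ∈ positions then ['O'] else ['#'])) []))]
  simp only [List.nil_append]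
  apply List.map_congr_left
  intro yrow _
  congr 1
  have hif : ∀ xt : Int × Char,
      (if xt.2 ≠ '#' ∧ (xt.1, yrow.1) ∉ positions then ['.']
       else if (xt.1, yrow.1) ∈ positions then ['O'] else ['#']) =
      [if xt.2 ≠ '#' ∧ (xt.1, yrow.1) ∉ positions then '.'
       else if (xt.1, yrow.1) ∈ positions then 'O' else '#'] := by
    intro xt; split_ifs <;> rfl
  simp only [hif]
  rw [PySem.List.foldl_append_singleton_eq_map
    (f := fun xt : Int × Char =>
      if xt.2 ≠ '#' ∧ (xt.1, yrow.1) ∉ positions then '.'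
      else if (xt.1, yrow.1) ∈ positions then 'O' else '#')]
  simp

-- ===== VERDICT (by name: the statement is the Claim_ definition above) =====
theorem grid_for_positions_spec : Claim_equal_grid_for_positions := by
  intro grid positions _
  unfold Spec_grid_for_positions grid_for_positions_alt
  rw [gridA_eq_map]
  have hbl : (gfpBase grid).length = grid.length := by simp [gfpBase]
  apply List.ext_getElem
  · simp [gfpFold_length, gfpBase, PySem.List.length_enumerate]
  · intro y hy1 hy2
    have hyg : y < grid.length := by simpa [PySem.List.length_enumerate] using hy1
    have hyf : y < (positions.foldl gfpPlace (gfpBase grid)).length := by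
      simpa [gfpFold_length, hbl] using hyg
    have hrowbase : (gfpBase grid).getD y [] = grid[y].toList.map (fun t => if t = '#' then '#' else '.') := by
      rw [List.getD_eq_getElem _ _ (by omega)]
      simp [gfpBase]
    have hflen : (positions.foldl gfpPlace (gfpBase grid))[y].length = grid[y].toList.length := by
      have h := gfpFold_row_length positions (gfpBase grid) y
      rw [List.getD_eq_getElem _ _ hyf, hrowbase] at h
      simpa using h
    simp only [List.getElem_map, PySem.List.getElem_enumerate, zero_add]
    congr 1
    apply List.ext_getElem
    · simp [hflen, PySem.List.length_enumerate]
    · intro x hx1 hx2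
      have hxr : x < grid[y].toList.length := by
        simpa [PySem.List.length_enumerate] using hx1
      have hxb : x < ((gfpBase grid).getD y []).length := by
        rw [hrowbase]; simpa using hxr
      have hpt := gfpFold_point positions (gfpBase grid) y x 'a' (by omega) hxb
      rw [List.getD_eq_getElem _ _ hyf,
        List.getD_eq_getElem _ _ (by rw [hflen]; exact hxr),
        hrowbase,
        List.getD_eq_getElem _ _ (by simpa using hxr)] at hpt
      rw [hpt]
      simp only [PySem.List.getElem_enumerate, List.getElem_map, zero_add]
      by_cases hmem : ((x : Int), (y : Int)) ∈ positions <;>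
        by_cases hsh : grid[y].toList[x] = '#' <;>
          simp [hmem, hsh]
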